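-- pv_equiv track=rewrite | github.com/b-cheek/Miscellaneous | noteSequence/greedy_sequence_maximizer.py | greedy_maximize_sequence
-- ===== SOURCE A (Python) =====
-- def greedy_maximize_sequence(n, max_interval=24):
--     """
--     Construct a sequence of length n (starting with 0) maximizing unique intervals, etc.
--     Args:
--         n: int, length of sequence
--         max_interval: int, max jump allowed in either direction
--     Returns:
--         list of ints: the constructed sequence
--     """
--     seq = [0]
--     used_notes = set(seq)
--     unique_intervals = set()
--     center = 0
--     max_distance = 0
--     distance_increments = 0
--
--     for i in range(1, n):
--         best_candidates = []
--         best_score = None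
--         # Try all possible next notes within allowed interval
--         for next_note in range(seq[-1] - max_interval, seq[-1] + max_interval + 1):
--             if next_note in used_notes:
--                 continue
--             interval = next_note - seq[-1]
--             new_unique_intervals = unique_intervals | {interval}
--             new_distance = abs(next_note - center)
--             new_distance_increments = distance_increments + (1 if new_distance > max_distance else 0)
--             new_sum_abs_intervals = sum(abs(x) for x in new_unique_intervals)
--             score = (
--                 len(new_unique_intervals),
--                 new_distance_increments,
--                 -new_sum_abs_intervals
--             )
--             if best_score is None or score > best_score:
--                 best_candidates = [(next_note, new_unique_intervals, new_distance, new_distance_increments, new_sum_abs_intervals)]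
--                 best_score = score
--             elif score == best_score:
--                 best_candidates.append((next_note, new_unique_intervals, new_distance, new_distance_increments, new_sum_abs_intervals))
--         # Pick one of the best candidates (e.g., the smallest next_note for determinism)
--         if not best_candidates:
--             break  # No valid next note
--         next_note, unique_intervals, max_distance, distance_increments, _ = min(best_candidates, key=lambda x: abs(x[0]))
--         seq.append(next_note)
--         used_notes.add(next_note)
--     return seq
-- ===== SOURCE B (Python) =====
-- def greedy_maximize_sequence(n, max_interval=24):
--     """
--     Construct a sequence of length n (starting with 0) maximizing unique intervals.
--
--     Same result as A, but by a first-fit priority search: instead of scoring every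
--     candidate with a tuple and taking the minimum, candidates are enumerated in the
--     preference order the score induces (fresh interval before reused, reach-extending
--     before not, then by |interval| resp. closeness to 0) and the first feasible one
--     is taken, so no score tuples or interval-set copies are built at all.
--     """
--     seq = [0]
--     used = {0}
--     intervals = set()
--     maxd = 0
--     for _ in range(1, n):
--         last = seq[-1]
--         note = _pick(last, used, intervals, maxd, max_interval)
--         if note is None:
--             break
--         intervals.add(note - last)
--         maxd = abs(note)
--         seq.append(note)
--         used.add(note)
--     return seq
--
--
-- def _rank(x):
--     # closest to 0 first; at equal distance the negative note first
--     return 2 * abs(x) + (x > 0)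
--
--
-- def _first(order, used, intervals, last, maxd, fresh, far):
--     # first note in `order` that is unused and lies in the (fresh, far) class
--     for x in order:
--         if (x not in used
--                 and ((x - last) not in intervals) == fresh
--                 and (abs(x) > maxd) == far):
--             return x
--     return None
--
--
-- def _pick(last, used, intervals, maxd, mi):
--     # visit order for fresh-interval classes: by |interval|, then by rank
--     by_iv = []
--     for d in range(1, mi + 1):
--         lo, hi = last - d, last + d
--         by_iv += [hi, lo] if _rank(hi) < _rank(lo) else [lo, hi]
--     # visit order for reused-interval classes: by rank alone
--     by_note = sorted(range(last - mi, last + mi + 1), key=_rank)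
--     for fresh, order in ((True, by_iv), (False, by_note)):
--         for far in (True, False):
--             found = _first(order, used, intervals, last, maxd, fresh, far)
--             if found is not None:
--                 return found
--     return None
-- ===== Notes on version B (the rewrite author's own statement) =====
-- stated objective: faster
-- what changed: Replaced A's score-every-candidate-and-take-the-min greedy step (which copies the interval set and re-sums it per candidate) by a first-fit priority search: candidates are enumerated in the preference order the score induces (fresh-interval/reach-extending classes first, then by |interval| resp. closeness to 0) and the first feasible note is taken, with no score tuples or set copies at all.
import Mathlib
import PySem

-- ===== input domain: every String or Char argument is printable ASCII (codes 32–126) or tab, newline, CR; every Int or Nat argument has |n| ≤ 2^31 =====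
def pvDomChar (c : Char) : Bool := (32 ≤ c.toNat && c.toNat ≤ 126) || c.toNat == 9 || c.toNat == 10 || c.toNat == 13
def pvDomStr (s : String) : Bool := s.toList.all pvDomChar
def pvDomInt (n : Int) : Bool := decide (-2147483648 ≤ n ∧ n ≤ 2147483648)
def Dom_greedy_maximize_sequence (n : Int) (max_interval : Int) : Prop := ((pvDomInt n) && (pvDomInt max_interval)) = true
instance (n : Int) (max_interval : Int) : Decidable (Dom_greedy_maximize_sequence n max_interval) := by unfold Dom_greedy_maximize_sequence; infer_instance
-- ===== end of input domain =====

-- B replaces A's score-every-candidate-and-take-the-min greedy step by a first-fit priority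
-- search over candidates enumerated in the preference order the score induces (objective: faster).

-- ===== PORT A =====
-- Python tuple comparison score > best_score on the 3-tuple scores
def pvScoreGt (a b : Int × Int × Int) : Bool :=
  a.1 > b.1 || (a.1 == b.1 && (a.2.1 > b.2.1 || (a.2.1 == b.2.1 && a.2.2 > b.2.2)))

-- candidate tuple (next_note, new_unique_intervals, new_distance, new_distance_increments, new_sum_abs_intervals)
abbrev pvACand := Int × PySem.Set Int × Int × Int × Int

-- body of A's inner 'for next_note in range(...)' loop
def pvAStep (used uniq : PySem.Set Int) (center maxd incr last : Int)
    (st : List pvACand × Option (Int × Int × Int)) (note : Int) :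
    List pvACand × Option (Int × Int × Int) :=
  if used.contains note then st else
  let iv := note - last
  let nui := PySem.Set.add uniq iv
  let nd := |note - center|
  let ndi := incr + (if nd > maxd then 1 else 0)
  let nsum := (nui.map (fun x => |x|)).sum
  let sc : Int × Int × Int := ((nui.length : Int), ndi, -nsum)
  match st.2 with
  | none => ([(note, nui, nd, ndi, nsum)], some sc)
  | some bs =>
    if pvScoreGt sc bs then ([(note, nui, nd, ndi, nsum)], some sc)
    else if sc == bs then (st.1 ++ [(note, nui, nd, ndi, nsum)], some bs)
    else st

-- A's inner loop: best_candidates, best_score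
def pvAInner (used uniq : PySem.Set Int) (center maxd incr last mi : Int) :
    List pvACand × Option (Int × Int × Int) :=
  (PySem.List.pyRange (last - mi) (last + mi + 1) 1).foldl
    (pvAStep used uniq center maxd incr last) ([], none)

-- A's outer 'for i in range(1, n)' loop with break
def pvALoop (k : Nat) (seq : List Int) (used uniq : PySem.Set Int)
    (center maxd incr mi : Int) : List Int :=
  match k with
  | 0 => seq
  | Nat.succ k =>
    let last := (PySem.List.pyGet? seq (-1)).getD 0
    let bc := (pvAInner used uniq center maxd incr last mi).1
    match PySem.List.min? bc (fun x => |x.1|) with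
    | none => seq
    | some c => pvALoop k (seq ++ [c.1]) (PySem.Set.add used c.1) c.2.1 center c.2.2.1 c.2.2.2.1 mi

def greedy_maximize_sequence (n : Int) (max_interval : Int) : List Int :=
  pvALoop (n - 1).toNat [0] (PySem.Set.ofList [0]) PySem.Set.empty 0 0 0 max_interval

-- ===== PORT B =====
-- Source B's _rank: closest to 0 first, negative before positive at equal distance
def pvAbsKey (x : Int) : Int := 2 * |x| + (if 0 < x then 1 else 0)

-- the condition tested inside Source B's _first
def pvP (used intervals : PySem.Set Int) (last maxd : Int) (fresh far : Bool) (x : Int) : Bool :=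
  !used.contains x && ((!intervals.contains (x - last)) == fresh) && (decide (|x| > maxd) == far)

-- Source B's _first: first note in order that is unused and lies in the (fresh, far) class
def pvFirst (order : List Int) (used intervals : PySem.Set Int) (last maxd : Int)
    (fresh far : Bool) : Option Int :=
  order.find? (pvP used intervals last maxd fresh far)

-- Source B's by_iv list: for d = 1..mi the pair last±d, rank-ordered
def pvByIv (last mi : Int) : List Int :=
  (PySem.List.pyRange 1 (mi + 1) 1).foldl (fun acc d =>
    acc ++ (if pvAbsKey (last + d) < pvAbsKey (last - d)
            then [last + d, last - d] else [last - d, last + d])) []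

-- Source B's by_note list: the window sorted by rank
def pvByNote (last mi : Int) : List Int :=
  PySem.List.sorted (PySem.List.pyRange (last - mi) (last + mi + 1) 1) pvAbsKey

-- Source B's _pick: the four (fresh, far) classes in preference order, first hit wins
def pvPick (last : Int) (used intervals : PySem.Set Int) (maxd mi : Int) : Option Int :=
  match pvFirst (pvByIv last mi) used intervals last maxd true true with
  | some x => some x
  | none =>
  match pvFirst (pvByIv last mi) used intervals last maxd true false with
  | some x => some x
  | none =>
  match pvFirst (pvByNote last mi) used intervals last maxd false true with
  | some x => some x
  | none => pvFirst (pvByNote last mi) used intervals last maxd false false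

def pvBLoop (k : Nat) (seq : List Int) (used intervals : PySem.Set Int)
    (maxd mi : Int) : List Int :=
  match k with
  | 0 => seq
  | Nat.succ k =>
    let last := (PySem.List.pyGet? seq (-1)).getD 0
    match pvPick last used intervals maxd mi with
    | none => seq
    | some note =>
      pvBLoop k (seq ++ [note]) (PySem.Set.add used note)
        (PySem.Set.add intervals (note - last)) |note| mi

def greedy_maximize_sequence_alt (n : Int) (max_interval : Int) : List Int :=
  pvBLoop (n - 1).toNat [0] (PySem.Set.ofList [0]) PySem.Set.empty 0 max_interval

-- ===== PRECONDITION & SPEC =====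
def Spec_greedy_maximize_sequence (n : Int) (max_interval : Int) (out : List Int) : Prop := out = greedy_maximize_sequence_alt n max_interval
instance (n : Int) (max_interval : Int) (out : List Int) : Decidable (Spec_greedy_maximize_sequence n max_interval out) := by unfold Spec_greedy_maximize_sequence; infer_instance

-- ===== CLAIM (what is proved, stated in full; the proofs are below) =====
def Claim_equal_greedy_maximize_sequence : Prop := ∀ (n : Int) (max_interval : Int), Dom_greedy_maximize_sequence n max_interval → Spec_greedy_maximize_sequence n max_interval (greedy_maximize_sequence n max_interval)

-- ===== LEMMAS AND PROOFS =====

abbrev pvKey := Int × Int × Int × Int × Int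

-- lexicographic < on the 5-tuple keys
def pvKeyLt (a b : pvKey) : Bool :=
  a.1 < b.1 || (a.1 == b.1 && (a.2.1 < b.2.1 || (a.2.1 == b.2.1 && (a.2.2.1 < b.2.2.1 ||
    (a.2.2.1 == b.2.2.1 && (a.2.2.2.1 < b.2.2.2.1 ||
      (a.2.2.2.1 == b.2.2.2.1 && a.2.2.2.2 < b.2.2.2.2)))))))

-- the comparison key of a candidate note (first two components = its class bits)
def pvKeyOf (uniq : PySem.Set Int) (maxd last note : Int) : pvKey :=
  ((if (!uniq.contains (note - last)) then (0:Int) else 1),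
   (if |note| > maxd then (0:Int) else 1),
   (if (!uniq.contains (note - last)) then |note - last| else 0),
   |note|, note)

-- the score A computes for a candidate note
def pvScoreOf (uniq : PySem.Set Int) (maxd incr last note : Int) : Int × Int × Int :=
  (((PySem.Set.add uniq (note - last)).length : Int),
   incr + (if |note - 0| > maxd then 1 else 0),
   -(((PySem.Set.add uniq (note - last)).map (fun x => |x|)).sum))

-- the full candidate tuple A builds for a note
def pvCandOf (uniq : PySem.Set Int) (maxd incr last note : Int) : pvACand :=
  (note, PySem.Set.add uniq (note - last), |note - 0|,
   incr + (if |note - 0| > maxd then 1 else 0),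
   ((PySem.Set.add uniq (note - last)).map (fun x => |x|)).sum)

-- a reference fold computing the minimal key over the window (proof device)
def pvMStep (used intervals : PySem.Set Int) (maxd last : Int)
    (best : Option pvKey) (note : Int) : Option pvKey :=
  if used.contains note then best else
  let key := pvKeyOf intervals maxd last note
  match best with
  | none => some key
  | some b => if pvKeyLt key b then some key else some b

def pvMInner (used intervals : PySem.Set Int) (maxd last mi : Int) : Option pvKey :=
  (PySem.List.pyRange (last - mi) (last + mi + 1) 1).foldl
    (pvMStep used intervals maxd last) none

theorem pv_add_length (u : PySem.Set Int) (iv : Int) :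
    ((PySem.Set.add u iv).length : Int) =
      (u.length : Int) + (if u.contains iv then 0 else 1) := by
  simp [PySem.Set.add]; split_ifs <;> simp

theorem pv_add_sum (u : PySem.Set Int) (iv : Int) :
    ((PySem.Set.add u iv).map (fun x => |x|)).sum =
      ((u.map (fun x => |x|)).sum : Int) + (if u.contains iv then 0 else |iv|) := by
  simp [PySem.Set.add]; split_ifs <;> simp

-- score comparison of two candidates ↔ key comparison
theorem pv_score_key (u : PySem.Set Int) (maxd incr last c m : Int) (hmc : m < c) :
    (pvScoreGt (pvScoreOf u maxd incr last c) (pvScoreOf u maxd incr last m) = true →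
       pvKeyLt (pvKeyOf u maxd last c) (pvKeyOf u maxd last m) = true) ∧
    (pvScoreOf u maxd incr last c = pvScoreOf u maxd incr last m →
       (pvKeyLt (pvKeyOf u maxd last c) (pvKeyOf u maxd last m) = true ↔ |c| < |m|)) ∧
    (pvScoreGt (pvScoreOf u maxd incr last c) (pvScoreOf u maxd incr last m) = false →
       pvScoreOf u maxd incr last c ≠ pvScoreOf u maxd incr last m →
       pvKeyLt (pvKeyOf u maxd last c) (pvKeyOf u maxd last m) = false) := by
  have hac : (0:Int) ≤ |c - last| := abs_nonneg _
  have ham : (0:Int) ≤ |m - last| := abs_nonneg _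
  simp only [pvScoreGt, pvScoreOf, pvKeyLt, pvKeyOf, pv_add_length, pv_add_sum, sub_zero,
    Prod.mk.injEq, Bool.or_eq_true, Bool.and_eq_true, decide_eq_true_eq, beq_iff_eq,
    Bool.or_eq_false_iff, Bool.and_eq_false_iff, decide_eq_false_iff_not, Bool.not_eq_true,
    beq_eq_false_iff_ne, ne_eq, Bool.if_true_left]
  generalize (u.map (fun x => |x|)).sum = S
  generalize hbc : |c| = bc
  generalize hbm : |m| = bm
  generalize |c - last| = ac at hac
  generalize |m - last| = am at ham
  rcases h1 : u.contains (c - last) <;> rcases h2 : u.contains (m - last) <;>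
    simp only [Bool.not_true, Bool.not_false, if_true, if_false] <;>
    split_ifs <;>
    constructor <;> try constructor
  all_goals (try intro h; try intro hne)
  all_goals try contradiction
  all_goals simp only [true_and, and_true, not_true, not_false_eq_true, false_or, or_false, false_and, and_false, gt_iff_lt] at *
  all_goals omega

-- min? over an appended singleton
theorem pv_min?_append {α : Type} (l : List α) (c : α) (key : α → Int) :
    PySem.List.min? (l ++ [c]) key =
      match PySem.List.min? l key with
      | none => some c
      | some m => if key c < key m then some c else some m := by
  simp only [PySem.List.min?, List.foldl_append, List.foldl_cons, List.foldl_nil]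
  rfl

-- the simulation invariant between A's inner state and the reference fold's state
def pvInv (used u : PySem.Set Int) (maxd incr last : Int) (notes : List Int)
    (st : List pvACand × Option (Int × Int × Int)) (b : Option pvKey) : Prop :=
  match b with
  | none => st = ([], none)
  | some key => ∃ m, key = pvKeyOf u maxd last m ∧
      st.2 = some (pvScoreOf u maxd incr last m) ∧
      PySem.List.min? st.1 (fun x => |x.1|) = some (pvCandOf u maxd incr last m) ∧
      ∀ x ∈ notes, m < x

theorem pvAStep_skip (used u : PySem.Set Int) (maxd incr last : Int)
    (st : List pvACand × Option (Int × Int × Int)) (note : Int)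
    (h : used.contains note = true) :
    pvAStep used u 0 maxd incr last st note = st := by
  unfold pvAStep; rw [if_pos h]

theorem pvMStep_skip (used u : PySem.Set Int) (maxd last : Int)
    (b : Option pvKey) (note : Int) (h : used.contains note = true) :
    pvMStep used u maxd last b note = b := by
  unfold pvMStep; rw [if_pos h]

theorem pvAStep_go (used u : PySem.Set Int) (maxd incr last : Int)
    (st : List pvACand × Option (Int × Int × Int)) (note : Int)
    (h : used.contains note = false) :
    pvAStep used u 0 maxd incr last st note =
      match st.2 with
      | none => ([pvCandOf u maxd incr last note], some (pvScoreOf u maxd incr last note))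
      | some bs =>
        if pvScoreGt (pvScoreOf u maxd incr last note) bs then
          ([pvCandOf u maxd incr last note], some (pvScoreOf u maxd incr last note))
        else if pvScoreOf u maxd incr last note == bs then
          (st.1 ++ [pvCandOf u maxd incr last note], some bs)
        else st := by
  unfold pvAStep pvCandOf pvScoreOf; rw [if_neg (by simp only [h]; exact Bool.false_ne_true)]

theorem pvMStep_go (used u : PySem.Set Int) (maxd last : Int)
    (b : Option pvKey) (note : Int) (h : used.contains note = false) :
    pvMStep used u maxd last b note =
      match b with
      | none => some (pvKeyOf u maxd last note)
      | some bb =>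
        if pvKeyLt (pvKeyOf u maxd last note) bb then some (pvKeyOf u maxd last note)
        else some bb := by
  unfold pvMStep pvKeyOf; rw [if_neg (by simp only [h]; exact Bool.false_ne_true)]

theorem pv_inner_sim (used u : PySem.Set Int) (maxd incr last : Int)
    (notes : List Int) (hs : notes.Pairwise (· < ·))
    (st : List pvACand × Option (Int × Int × Int)) (b : Option pvKey)
    (hinv : pvInv used u maxd incr last notes st b) :
    pvInv used u maxd incr last []
      (notes.foldl (pvAStep used u 0 maxd incr last) st)
      (notes.foldl (pvMStep used u maxd last) b) := by
  induction notes generalizing st b with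
  | nil => exact hinv
  | cons c rest ih =>
    rw [List.pairwise_cons] at hs
    obtain ⟨hc, hrest⟩ := hs
    simp only [List.foldl_cons]
    refine ih hrest _ _ ?_
    by_cases hu : used.contains c = true
    · rw [pvAStep_skip _ _ _ _ _ _ _ hu, pvMStep_skip _ _ _ _ _ _ hu]
      cases b with
      | none => exact hinv
      | some key =>
        obtain ⟨m, h1, h2, h3, h4⟩ := hinv
        exact ⟨m, h1, h2, h3, fun x hx => h4 x (List.mem_cons_of_mem _ hx)⟩
    · rw [Bool.not_eq_true] at hu
      rw [pvAStep_go _ _ _ _ _ _ _ hu, pvMStep_go _ _ _ _ _ _ hu]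
      cases b with
      | none =>
        have hst : st = ([], none) := hinv
        subst hst
        exact ⟨c, rfl, rfl, rfl, fun x hx => hc x hx⟩
      | some key =>
        obtain ⟨m, h1, h2, h3, h4⟩ := hinv
        have hmc : m < c := h4 c (List.mem_cons_self ..)
        obtain ⟨k1, k2, k3⟩ := pv_score_key u maxd incr last c m hmc
        rw [h2]
        subst h1
        by_cases hgt : pvScoreGt (pvScoreOf u maxd incr last c) (pvScoreOf u maxd incr last m) = true
        · simp only [hgt, if_true, k1 hgt]
          exact ⟨c, rfl, rfl, rfl, fun x hx => hc x hx⟩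
        · rw [Bool.not_eq_true] at hgt
          simp only [hgt, Bool.false_eq_true, if_false]
          by_cases heq : pvScoreOf u maxd incr last c = pvScoreOf u maxd incr last m
          · have hbeq : (pvScoreOf u maxd incr last c == pvScoreOf u maxd incr last m) = true := by
              simp [heq]
            simp only [hbeq, if_true]
            have hiff := k2 heq
            by_cases habs : |c| < |m|
            · have : pvKeyLt (pvKeyOf u maxd last c) (pvKeyOf u maxd last m) = true := hiff.mpr habs
              simp only [this, if_true]
              refine ⟨c, rfl, by rw [heq], ?_, fun x hx => hc x hx⟩
              rw [pv_min?_append, h3]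
              simp only [pvCandOf]
              rw [if_pos habs]
            · have hklt : pvKeyLt (pvKeyOf u maxd last c) (pvKeyOf u maxd last m) = false := by
                cases hk : pvKeyLt (pvKeyOf u maxd last c) (pvKeyOf u maxd last m) with
                | false => rfl
                | true => exact absurd (hiff.mp hk) habs
              simp only [hklt, Bool.false_eq_true, if_false]
              refine ⟨m, rfl, rfl, ?_, fun x hx => h4 x (List.mem_cons_of_mem _ hx)⟩
              rw [pv_min?_append, h3]
              simp only [pvCandOf]
              rw [if_neg habs]
          · have hbeq : (pvScoreOf u maxd incr last c == pvScoreOf u maxd incr last m) = false := by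
              simp [heq]
            simp only [hbeq, Bool.false_eq_true, if_false]
            have hklt := k3 hgt heq
            simp only [hklt, Bool.false_eq_true, if_false]
            exact ⟨m, rfl, h2, h3, fun x hx => h4 x (List.mem_cons_of_mem _ hx)⟩

-- ---- strict-order facts about pvKeyLt ----

theorem pvKeyLt_irrefl (a : pvKey) : pvKeyLt a a = false := by
  obtain ⟨a1, a2, a3, a4, a5⟩ := a
  simp [pvKeyLt]

theorem pvKeyLt_trans {a b c : pvKey} (h1 : pvKeyLt a b = true) (h2 : pvKeyLt b c = true) :
    pvKeyLt a c = true := by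
  obtain ⟨a1, a2, a3, a4, a5⟩ := a; obtain ⟨b1, b2, b3, b4, b5⟩ := b
  obtain ⟨c1, c2, c3, c4, c5⟩ := c
  simp only [pvKeyLt, Bool.or_eq_true, Bool.and_eq_true, decide_eq_true_eq, beq_iff_eq] at *
  omega

theorem pvKeyLt_asymm {a b : pvKey} (h : pvKeyLt a b = true) : pvKeyLt b a = false := by
  obtain ⟨a1, a2, a3, a4, a5⟩ := a; obtain ⟨b1, b2, b3, b4, b5⟩ := b
  simp only [pvKeyLt, Bool.or_eq_true, Bool.and_eq_true, decide_eq_true_eq, beq_iff_eq,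
    Bool.or_eq_false_iff, Bool.and_eq_false_iff, decide_eq_false_iff_not, not_lt,
    beq_eq_false_iff_ne, ne_eq] at *
  omega

theorem pvKeyLt_connex {a b : pvKey} (h : a.2.2.2.2 ≠ b.2.2.2.2) :
    pvKeyLt a b = true ∨ pvKeyLt b a = true := by
  obtain ⟨a1, a2, a3, a4, a5⟩ := a; obtain ⟨b1, b2, b3, b4, b5⟩ := b
  simp only [pvKeyLt, Bool.or_eq_true, Bool.and_eq_true, decide_eq_true_eq, beq_iff_eq] at *
  omega

-- ---- facts about pvAbsKey ----

theorem pvAbsKey_lt_iff (x y : Int) :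
    pvAbsKey x < pvAbsKey y ↔ (|x| < |y| ∨ (|x| = |y| ∧ x < y)) := by
  unfold pvAbsKey
  rcases abs_cases x with ⟨h1, h2⟩ | ⟨h1, h2⟩ <;> rcases abs_cases y with ⟨h3, h4⟩ | ⟨h3, h4⟩ <;>
    split_ifs <;> omega

theorem pvAbsKey_inj {x y : Int} (h : pvAbsKey x = pvAbsKey y) : x = y := by
  unfold pvAbsKey at h
  rcases abs_cases x with ⟨h1, h2⟩ | ⟨h1, h2⟩ <;> rcases abs_cases y with ⟨h3, h4⟩ | ⟨h3, h4⟩ <;>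
    split_ifs at h <;> omega

-- ---- within-class and cross-class key comparisons ----

theorem pv_keyLt_fresh (u : PySem.Set Int) (maxd last x y : Int)
    (hx : u.contains (x - last) = false) (hy : u.contains (y - last) = false)
    (hg : decide (|x| > maxd) = decide (|y| > maxd))
    (h : |x - last| < |y - last| ∨ (|x - last| = |y - last| ∧ pvAbsKey x < pvAbsKey y)) :
    pvKeyLt (pvKeyOf u maxd last x) (pvKeyOf u maxd last y) = true := by
  rw [pvAbsKey_lt_iff] at h
  have hgg : (|x| > maxd ↔ |y| > maxd) := decide_eq_decide.mp hg
  simp only [pvKeyOf, pvKeyLt, hx, hy, Bool.not_false, Bool.not_true, Bool.false_eq_true,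
    eq_self_iff_true, if_true, if_false, Bool.or_eq_true, Bool.and_eq_true, decide_eq_true_eq,
    beq_iff_eq, gt_iff_lt, true_and, and_true]
  split_ifs <;> omega

theorem pv_keyLt_stale (u : PySem.Set Int) (maxd last x y : Int)
    (hx : u.contains (x - last) = true) (hy : u.contains (y - last) = true)
    (hg : decide (|x| > maxd) = decide (|y| > maxd))
    (h : pvAbsKey x < pvAbsKey y) :
    pvKeyLt (pvKeyOf u maxd last x) (pvKeyOf u maxd last y) = true := by
  rw [pvAbsKey_lt_iff] at h
  have hgg : (|x| > maxd ↔ |y| > maxd) := decide_eq_decide.mp hg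
  simp only [pvKeyOf, pvKeyLt, hx, hy, Bool.not_false, Bool.not_true, Bool.false_eq_true,
    eq_self_iff_true, if_true, if_false, Bool.or_eq_true, Bool.and_eq_true, decide_eq_true_eq,
    beq_iff_eq, gt_iff_lt, true_and, and_true]
  split_ifs <;> omega

theorem pv_keyLt_cross (u : PySem.Set Int) (maxd last x y : Int)
    (h : (u.contains (x - last) = false ∧ u.contains (y - last) = true)
       ∨ (u.contains (x - last) = u.contains (y - last) ∧ |x| > maxd ∧ ¬(|y| > maxd))) :
    pvKeyLt (pvKeyOf u maxd last x) (pvKeyOf u maxd last y) = true := by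
  rcases h with ⟨h1, h2⟩ | ⟨h1, h2, h3⟩
  · simp only [pvKeyOf, pvKeyLt, h1, h2, Bool.not_false, Bool.not_true, Bool.false_eq_true,
      eq_self_iff_true, if_true, if_false, Bool.or_eq_true, Bool.and_eq_true, decide_eq_true_eq,
      beq_iff_eq, gt_iff_lt, true_and, and_true]
    split_ifs <;> omega
  · cases hcx : u.contains (x - last) with
    | false =>
      have hcy : u.contains (y - last) = false := by rw [← h1, hcx]
      simp only [pvKeyOf, pvKeyLt, hcx, hcy, Bool.not_false, Bool.not_true, Bool.false_eq_true,
        eq_self_iff_true, if_true, if_false, Bool.or_eq_true, Bool.and_eq_true, decide_eq_true_eq,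
        beq_iff_eq, gt_iff_lt, true_and, and_true]
      split_ifs <;> omega
    | true =>
      have hcy : u.contains (y - last) = true := by rw [← h1, hcx]
      simp only [pvKeyOf, pvKeyLt, hcx, hcy, Bool.not_false, Bool.not_true, Bool.false_eq_true,
        eq_self_iff_true, if_true, if_false, Bool.or_eq_true, Bool.and_eq_true, decide_eq_true_eq,
        beq_iff_eq, gt_iff_lt, true_and, and_true]
      split_ifs <;> omega

-- ---- find? returns the key-minimal matching element of a suitably ordered list ----

theorem pv_find_first {p : Int → Bool} {key : Int → pvKey} :
    ∀ {L : List Int},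
    L.Pairwise (fun a b => p a = true → p b = true → pvKeyLt (key a) (key b) = true) →
    ∀ {m : Int}, m ∈ L → p m = true →
    (∀ x ∈ L, p x = true → x ≠ m → pvKeyLt (key m) (key x) = true) →
    L.find? p = some m := by
  intro L
  induction L with
  | nil => intro _ m hm; simp at hm
  | cons h t ih =>
    intro hpair m hm hpm hmin
    rw [List.pairwise_cons] at hpair
    by_cases hph : p h = true
    · rw [List.find?_cons_of_pos hph]
      by_cases heq : h = m
      · rw [heq]
      · have hmt : m ∈ t := by
          cases hm with
          | head => exact absurd rfl heq
          | tail _ hmt => exact hmt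
        have h1 := hmin h (List.mem_cons_self ..) hph heq
        have h2 := hpair.1 m hmt hph hpm
        rw [pvKeyLt_asymm h2] at h1
        exact absurd h1 (by simp)
    · rw [List.find?_cons_of_neg hph]
      have hmt : m ∈ t := by
        cases hm with
        | head => exact absurd hpm hph
        | tail _ hmt => exact hmt
      exact ih hpair.2 hmt hpm (fun x hx => hmin x (List.mem_cons_of_mem _ hx))

-- ---- pairwise structure of the flatMap of ordered blocks ----

theorem pv_pairwise_flatMap {R : Int → Int → Prop} {f : Int → List Int} :
    ∀ {L : List Int}, L.Pairwise (· < ·) →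
    (∀ d ∈ L, (f d).Pairwise R) →
    (∀ d1 ∈ L, ∀ d2 ∈ L, d1 < d2 → ∀ x ∈ f d1, ∀ y ∈ f d2, R x y) →
    (L.flatMap f).Pairwise R := by
  intro L
  induction L with
  | nil => intro _ _ _; simp
  | cons h t ih =>
    intro hL hin hcross
    rw [List.pairwise_cons] at hL
    rw [List.flatMap_cons, List.pairwise_append]
    refine ⟨hin h (List.mem_cons_self ..), ?_, ?_⟩
    · exact ih hL.2 (fun d hd => hin d (List.mem_cons_of_mem _ hd))
        (fun d1 hd1 d2 hd2 => hcross d1 (List.mem_cons_of_mem _ hd1) d2 (List.mem_cons_of_mem _ hd2))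
    · intro a ha b hb
      obtain ⟨d2, hd2, hbf⟩ := List.mem_flatMap.mp hb
      exact hcross h (List.mem_cons_self ..) d2 (List.mem_cons_of_mem _ hd2) (hL.1 d2 hd2) a ha b hbf

-- ---- structure of pvByIv ----

def pvPairL (last d : Int) : List Int :=
  if pvAbsKey (last + d) < pvAbsKey (last - d) then [last + d, last - d] else [last - d, last + d]

theorem pvByIv_eq_flatMap (last mi : Int) :
    pvByIv last mi = (PySem.List.pyRange 1 (mi + 1) 1).flatMap (pvPairL last) := by
  have key : ∀ (L : List Int) (init : List Int),
      L.foldl (fun acc d => acc ++ pvPairL last d) init = init ++ L.flatMap (pvPairL last) := by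
    intro L
    induction L with
    | nil => intro init; simp
    | cons h t ih => intro init; simp [List.foldl_cons, ih, List.flatMap_cons]
  simpa [pvByIv, pvPairL] using key (PySem.List.pyRange 1 (mi + 1) 1) []

theorem mem_pvPairL {last d x : Int} : x ∈ pvPairL last d ↔ (x = last + d ∨ x = last - d) := by
  unfold pvPairL; split_ifs <;> simp <;> tauto

theorem mem_pvByIv {last mi x : Int} :
    x ∈ pvByIv last mi ↔ (1 ≤ |x - last| ∧ |x - last| ≤ mi) := by
  rw [pvByIv_eq_flatMap]
  simp only [List.mem_flatMap, PySem.List.mem_pyRange_one, mem_pvPairL]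
  constructor
  · rintro ⟨d, ⟨hd1, hd2⟩, rfl | rfl⟩ <;>
      [rw [show last + d - last = d by ring]; rw [show last - d - last = -d by ring, abs_neg]] <;>
      rw [abs_of_pos (by omega)] <;> omega
  · rintro ⟨h1, h2⟩
    rcases abs_cases (x - last) with ⟨he, hp⟩ | ⟨he, hp⟩
    · exact ⟨|x - last|, ⟨h1, by omega⟩, Or.inl (by omega)⟩
    · exact ⟨|x - last|, ⟨h1, by omega⟩, Or.inr (by omega)⟩

def pvIvR (last : Int) (x y : Int) : Prop :=
  |x - last| < |y - last| ∨ (|x - last| = |y - last| ∧ pvAbsKey x < pvAbsKey y)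

theorem pvByIv_pairwise (last mi : Int) : (pvByIv last mi).Pairwise (pvIvR last) := by
  rw [pvByIv_eq_flatMap]
  apply pv_pairwise_flatMap (PySem.List.pairwise_lt_pyRange_one _ _)
  · intro d hd
    rw [PySem.List.mem_pyRange_one] at hd
    have habs1 : |last + d - last| = d := by
      rw [show last + d - last = d by ring, abs_of_pos (by omega)]
    have habs2 : |last - d - last| = d := by
      rw [show last - d - last = -d by ring, abs_neg, abs_of_pos (by omega)]
    unfold pvPairL
    split_ifs with h
    · refine List.pairwise_cons.mpr ⟨?_, by simp⟩
      intro y hy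
      simp only [List.mem_singleton] at hy; subst hy
      exact Or.inr ⟨by rw [habs1, habs2], h⟩
    · refine List.pairwise_cons.mpr ⟨?_, by simp⟩
      intro y hy
      simp only [List.mem_singleton] at hy; subst hy
      refine Or.inr ⟨by rw [habs1, habs2], ?_⟩
      rcases lt_or_eq_of_le (le_of_not_gt h) with hlt | he
      · exact hlt
      · exact absurd (pvAbsKey_inj he) (by omega)
  · intro d1 hd1 d2 hd2 hlt x hx y hy
    rw [PySem.List.mem_pyRange_one] at hd1 hd2
    rcases mem_pvPairL.mp hx with rfl | rfl <;> rcases mem_pvPairL.mp hy with rfl | rfl <;>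
      left <;>
      simp only [show last + d1 - last = d1 by ring, show last - d1 - last = -d1 by ring,
        show last + d2 - last = d2 by ring, show last - d2 - last = -d2 by ring, abs_neg] <;>
      rw [abs_of_pos (by omega), abs_of_pos (by omega)] <;> omega

-- ---- structure of pvByNote ----

theorem mem_pvByNote {last mi x : Int} :
    x ∈ pvByNote last mi ↔ (last - mi ≤ x ∧ x < last + mi + 1) := by
  unfold pvByNote
  rw [PySem.List.mem_sorted, PySem.List.mem_pyRange_one]

theorem pvByNote_pairwise (last mi : Int) :
    (pvByNote last mi).Pairwise (fun a b => pvAbsKey a < pvAbsKey b) := by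
  have h1 := PySem.List.sorted_pairwise (PySem.List.pyRange (last - mi) (last + mi + 1) 1) pvAbsKey
  have h2 : (pvByNote last mi).Nodup :=
    ((PySem.List.sorted_perm _ _ _).nodup_iff).mpr (PySem.List.nodup_pyRange_one _ _)
  exact (h1.and h2).imp (fun hab =>
    lt_of_le_of_ne hab.1 (fun he => hab.2 (pvAbsKey_inj he)))

-- ---- the reference fold computes the key-minimal unused note of the window ----

def pvMinInv (used intervals : PySem.Set Int) (maxd last : Int)
    (seen : List Int) (acc : Option pvKey) : Prop :=
  match acc with
  | none => ∀ x ∈ seen, used.contains x = true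
  | some k => ∃ m, k = pvKeyOf intervals maxd last m ∧ m ∈ seen ∧
      used.contains m = false ∧
      ∀ y ∈ seen, used.contains y = false →
        pvKeyLt (pvKeyOf intervals maxd last y) (pvKeyOf intervals maxd last m) = false

theorem pvMin_fold (used intervals : PySem.Set Int) (maxd last : Int) :
    ∀ (L seen : List Int) (acc : Option pvKey),
    pvMinInv used intervals maxd last seen acc →
    pvMinInv used intervals maxd last (seen ++ L)
      (L.foldl (pvMStep used intervals maxd last) acc) := by
  intro L
  induction L with
  | nil => intro seen acc h; simpa using h
  | cons x t ih =>
    intro seen acc h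
    have step : pvMinInv used intervals maxd last (seen ++ [x])
        (pvMStep used intervals maxd last acc x) := by
      by_cases hu : used.contains x = true
      · rw [pvMStep_skip _ _ _ _ _ _ hu]
        cases acc with
        | none =>
          intro y hy
          rcases List.mem_append.mp hy with hy | hy
          · exact h y hy
          · simp only [List.mem_singleton] at hy; subst hy; exact hu
        | some k =>
          obtain ⟨m, hk, hmem, hmu, hmin⟩ := h
          refine ⟨m, hk, List.mem_append_left _ hmem, hmu, ?_⟩
          intro y hy hyu
          rcases List.mem_append.mp hy with hy | hy
          · exact hmin y hy hyu
          · simp only [List.mem_singleton] at hy; subst hy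
            rw [hu] at hyu; cases hyu
      · rw [Bool.not_eq_true] at hu
        rw [pvMStep_go _ _ _ _ _ _ hu]
        cases acc with
        | none =>
          refine ⟨x, rfl, List.mem_append_right _ (List.mem_singleton_self _), hu, ?_⟩
          intro y hy hyu
          rcases List.mem_append.mp hy with hy | hy
          · rw [h y hy] at hyu; cases hyu
          · simp only [List.mem_singleton] at hy; subst hy
            exact pvKeyLt_irrefl _
        | some k =>
          obtain ⟨m, hk, hmem, hmu, hmin⟩ := h
          subst hk
          by_cases hlt : pvKeyLt (pvKeyOf intervals maxd last x) (pvKeyOf intervals maxd last m) = true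
          · simp only [hlt, if_true]
            refine ⟨x, rfl, List.mem_append_right _ (List.mem_singleton_self _), hu, ?_⟩
            intro y hy hyu
            rcases List.mem_append.mp hy with hy | hy
            · cases hyx : pvKeyLt (pvKeyOf intervals maxd last y) (pvKeyOf intervals maxd last x) with
              | false => rfl
              | true =>
                have := pvKeyLt_trans hyx hlt
                rw [hmin y hy hyu] at this; cases this
            · simp only [List.mem_singleton] at hy; subst hy
              exact pvKeyLt_irrefl _
          · rw [Bool.not_eq_true] at hlt
            simp only [hlt, Bool.false_eq_true, if_false]
            refine ⟨m, rfl, List.mem_append_left _ hmem, hmu, ?_⟩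
            intro y hy hyu
            rcases List.mem_append.mp hy with hy | hy
            · exact hmin y hy hyu
            · simp only [List.mem_singleton] at hy; subst hy; exact hlt
    have := ih (seen ++ [x]) _ step
    simpa [List.append_assoc] using this

theorem pvMInner_spec (used intervals : PySem.Set Int) (maxd last mi : Int) :
    pvMinInv used intervals maxd last (PySem.List.pyRange (last - mi) (last + mi + 1) 1)
      (pvMInner used intervals maxd last mi) := by
  have h0 : pvMinInv used intervals maxd last [] (none : Option pvKey) := by
    intro y hy; simp at hy
  simpa using pvMin_fold used intervals maxd last _ [] none h0

-- ---- the first-fit search returns exactly the key-minimal unused note ----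

theorem pv_pick_eq (used intervals : PySem.Set Int) (maxd last mi : Int)
    (hlast : used.contains last = true) :
    pvPick last used intervals maxd mi =
      (pvMInner used intervals maxd last mi).map (fun k => k.2.2.2.2) := by
  have hinv := pvMInner_spec used intervals maxd last mi
  have hIvW : ∀ x ∈ pvByIv last mi, x ∈ PySem.List.pyRange (last - mi) (last + mi + 1) 1 := by
    intro x hx
    obtain ⟨h1, h2⟩ := mem_pvByIv.mp hx
    rw [PySem.List.mem_pyRange_one]
    rcases abs_cases (x - last) with ⟨he, _⟩ | ⟨he, _⟩ <;> omega
  have hNoteW : ∀ x ∈ pvByNote last mi, x ∈ PySem.List.pyRange (last - mi) (last + mi + 1) 1 := by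
    intro x hx
    rw [PySem.List.mem_pyRange_one]
    exact mem_pvByNote.mp hx
  cases hM : pvMInner used intervals maxd last mi with
  | none =>
    rw [hM] at hinv
    have hnone : ∀ (order : List Int),
        (∀ x ∈ order, x ∈ PySem.List.pyRange (last - mi) (last + mi + 1) 1) →
        ∀ (fresh far : Bool), pvFirst order used intervals last maxd fresh far = none := by
      intro order hord fresh far
      apply List.find?_eq_none.mpr
      intro x hx
      have hxm : x ∈ used := by simpa [PySem.Set.contains] using hinv x (hord x hx)
      simp [pvP, hxm]
    simp only [pvPick, hnone _ hIvW, hnone _ hNoteW, Option.map_none]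
  | some k =>
    rw [hM] at hinv
    obtain ⟨m, hk, hmW, hmu, hmin0⟩ := hinv
    subst hk
    have hmu' : m ∉ used := by simpa [PySem.Set.contains] using hmu
    have hlt : ∀ y ∈ PySem.List.pyRange (last - mi) (last + mi + 1) 1,
        used.contains y = false → y ≠ m →
        pvKeyLt (pvKeyOf intervals maxd last m) (pvKeyOf intervals maxd last y) = true := by
      intro y hy hyu hne
      have hne' : (pvKeyOf intervals maxd last y).2.2.2.2 ≠ (pvKeyOf intervals maxd last m).2.2.2.2 := by
        simpa [pvKeyOf] using hne
      rcases pvKeyLt_connex hne' with hc | hc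
      · rw [hmin0 y hy hyu] at hc; cases hc
      · exact hc
    have hm_ne_last : m ≠ last := by
      intro he; rw [he, hlast] at hmu; cases hmu
    have hmIv : m ∈ pvByIv last mi := by
      rw [mem_pvByIv]
      rw [PySem.List.mem_pyRange_one] at hmW
      rcases abs_cases (m - last) with ⟨he, _⟩ | ⟨he, _⟩ <;>
        constructor <;> omega
    have hmNote : m ∈ pvByNote last mi := by
      rw [mem_pvByNote]
      rw [PySem.List.mem_pyRange_one] at hmW
      exact hmW
    -- a pass whose class strictly beats m's class finds nothing
    have hpass_none : ∀ (order : List Int),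
        (∀ x ∈ order, x ∈ PySem.List.pyRange (last - mi) (last + mi + 1) 1) →
        ∀ (fresh far : Bool),
        (∀ x, used.contains x = false →
          (!intervals.contains (x - last)) = fresh → decide (|x| > maxd) = far →
          pvKeyLt (pvKeyOf intervals maxd last x) (pvKeyOf intervals maxd last m) = true) →
        pvFirst order used intervals last maxd fresh far = none := by
      intro order hord fresh far hbetter
      apply List.find?_eq_none.mpr
      intro x hx hpx
      simp only [pvP, Bool.and_eq_true, Bool.not_eq_true', beq_iff_eq] at hpx
      obtain ⟨⟨hxu, hxf⟩, hxg⟩ := hpx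
      have hxlt := hbetter x hxu hxf hxg
      have hxm : x ≠ m := by
        intro he; subst he
        rw [pvKeyLt_irrefl] at hxlt; cases hxlt
      have := hlt x (hord x hx) hxu hxm
      rw [pvKeyLt_asymm this] at hxlt
      cases hxlt
    -- the pass of m's own class finds exactly m
    have hpass_some : ∀ (order : List Int),
        (∀ x ∈ order, x ∈ PySem.List.pyRange (last - mi) (last + mi + 1) 1) →
        m ∈ order →
        ∀ (fresh far : Bool),
        order.Pairwise (fun a b => pvP used intervals last maxd fresh far a = true →
          pvP used intervals last maxd fresh far b = true →
          pvKeyLt (pvKeyOf intervals maxd last a) (pvKeyOf intervals maxd last b) = true) →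
        pvP used intervals last maxd fresh far m = true →
        pvFirst order used intervals last maxd fresh far = some m := by
      intro order hord hmo fresh far hpair hpm
      apply pv_find_first hpair hmo hpm
      intro x hx hpx hne
      simp only [pvP, Bool.and_eq_true, Bool.not_eq_true', beq_iff_eq] at hpx
      exact hlt x (hord x hx) hpx.1.1 hne
    -- pairwise facts specialised to the two orders
    have hpairIv : ∀ (far : Bool), (pvByIv last mi).Pairwise
        (fun a b => pvP used intervals last maxd true far a = true →
          pvP used intervals last maxd true far b = true →
          pvKeyLt (pvKeyOf intervals maxd last a) (pvKeyOf intervals maxd last b) = true) := by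
      intro far
      refine (pvByIv_pairwise last mi).imp ?_
      intro a b hab hpa hpb
      simp only [pvP, Bool.and_eq_true, Bool.not_eq_true', beq_iff_eq] at hpa hpb
      refine pv_keyLt_fresh intervals maxd last a b ?_ ?_ ?_ hab
      · simpa using hpa.1.2
      · simpa using hpb.1.2
      · rw [hpa.2, hpb.2]
    have hpairNote : ∀ (far : Bool), (pvByNote last mi).Pairwise
        (fun a b => pvP used intervals last maxd false far a = true →
          pvP used intervals last maxd false far b = true →
          pvKeyLt (pvKeyOf intervals maxd last a) (pvKeyOf intervals maxd last b) = true) := by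
      intro far
      refine (pvByNote_pairwise last mi).imp ?_
      intro a b hab hpa hpb
      simp only [pvP, Bool.and_eq_true, Bool.not_eq_true', beq_iff_eq] at hpa hpb
      refine pv_keyLt_stale intervals maxd last a b ?_ ?_ ?_ hab
      · simpa using hpa.1.2
      · simpa using hpb.1.2
      · rw [hpa.2, hpb.2]
    have hnote : (pvKeyOf intervals maxd last m).2.2.2.2 = m := rfl
    -- no fresh-class pass can succeed when m's interval is stale
    have hstaleblock : intervals.contains (m - last) = true →
        ∀ (far : Bool), pvFirst (pvByIv last mi) used intervals last maxd true far = none := by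
      intro hf far
      apply hpass_none _ hIvW
      intro x hxu hxf hxg
      have hxf' : intervals.contains (x - last) = false := by simpa using hxf
      exact pv_keyLt_cross intervals maxd last x m (Or.inl ⟨hxf', hf⟩)
    cases hf : intervals.contains (m - last) <;> cases hg : decide (|m| > maxd)
    · -- fresh, near: pass (true,true) empty, pass (true,false) finds m
      have hf' : m - last ∉ intervals := by simpa [PySem.Set.contains] using hf
      have hg' : ¬(|m| > maxd) := by simpa using hg
      have h1 : pvFirst (pvByIv last mi) used intervals last maxd true true = none := by
        apply hpass_none _ hIvW
        intro x hxu hxf hxg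
        have hxf' : intervals.contains (x - last) = false := by simpa using hxf
        have hxg' : |x| > maxd := by simpa using hxg
        exact pv_keyLt_cross intervals maxd last x m
          (Or.inr ⟨by rw [hxf', hf], hxg', hg'⟩)
      have h2 : pvFirst (pvByIv last mi) used intervals last maxd true false = some m := by
        apply hpass_some _ hIvW hmIv _ _ (hpairIv false)
        simp [pvP, hmu', hf', hg']
      simp only [pvPick, h1, h2, Option.map_some, hnote]
    · -- fresh, far: the first pass finds m
      have hf' : m - last ∉ intervals := by simpa [PySem.Set.contains] using hf
      have hg' : |m| > maxd := by simpa using hg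
      have h1 : pvFirst (pvByIv last mi) used intervals last maxd true true = some m := by
        apply hpass_some _ hIvW hmIv _ _ (hpairIv true)
        simp [pvP, hmu', hf', hg']
      simp only [pvPick, h1, Option.map_some, hnote]
    · -- stale, near: three passes empty, the last finds m
      have hf' : m - last ∈ intervals := by simpa [PySem.Set.contains] using hf
      have hg' : ¬(|m| > maxd) := by simpa using hg
      have h1 := hstaleblock hf true
      have h2 := hstaleblock hf false
      have h3 : pvFirst (pvByNote last mi) used intervals last maxd false true = none := by
        apply hpass_none _ hNoteW
        intro x hxu hxf hxg
        have hxf' : intervals.contains (x - last) = true := by simpa using hxf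
        have hxg' : |x| > maxd := by simpa using hxg
        exact pv_keyLt_cross intervals maxd last x m
          (Or.inr ⟨by rw [hxf', hf], hxg', hg'⟩)
      have h4 : pvFirst (pvByNote last mi) used intervals last maxd false false = some m := by
        apply hpass_some _ hNoteW hmNote _ _ (hpairNote false)
        simp [pvP, hmu', hf', hg']
      simp only [pvPick, h1, h2, h3, h4, Option.map_some, hnote]
    · -- stale, far: two fresh passes empty, the third finds m
      have hf' : m - last ∈ intervals := by simpa [PySem.Set.contains] using hf
      have hg' : |m| > maxd := by simpa using hg
      have h1 := hstaleblock hf true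
      have h2 := hstaleblock hf false
      have h3 : pvFirst (pvByNote last mi) used intervals last maxd false true = some m := by
        apply hpass_some _ hNoteW hmNote _ _ (hpairNote true)
        simp [pvP, hmu', hf', hg']
      simp only [pvPick, h1, h2, h3, Option.map_some, hnote]

-- ---- small facts for the outer loop ----

theorem pv_pyGet_append_last (l : List Int) (a : Int) :
    PySem.List.pyGet? (l ++ [a]) (-1) = some a := by
  simp [PySem.List.pyGet?, PySem.List.pyIdx?]

theorem pv_contains_add_self (s : PySem.Set Int) (x : Int) :
    (PySem.Set.add s x).contains x = true := by
  simp only [PySem.Set.add, PySem.Set.contains]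
  split_ifs with h
  · simpa using h
  · simp

-- ---- the two outer loops agree ----

theorem pv_loop_eq (k : Nat) (seq : List Int) (used u : PySem.Set Int)
    (maxd incr mi : Int)
    (hlast : used.contains ((PySem.List.pyGet? seq (-1)).getD 0) = true) :
    pvALoop k seq used u 0 maxd incr mi = pvBLoop k seq used u maxd mi := by
  induction k generalizing seq used u maxd incr with
  | zero => rfl
  | succ k ih =>
    have hsim : pvInv used u maxd incr ((PySem.List.pyGet? seq (-1)).getD 0) []
        (pvAInner used u 0 maxd incr ((PySem.List.pyGet? seq (-1)).getD 0) mi)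
        (pvMInner used u maxd ((PySem.List.pyGet? seq (-1)).getD 0) mi) :=
      pv_inner_sim used u maxd incr ((PySem.List.pyGet? seq (-1)).getD 0) _
        (PySem.List.pairwise_lt_pyRange_one _ _) ([], none) none rfl
    have hpick := pv_pick_eq used u maxd ((PySem.List.pyGet? seq (-1)).getD 0) mi hlast
    cases hB : pvMInner used u maxd ((PySem.List.pyGet? seq (-1)).getD 0) mi with
    | none =>
      rw [hB] at hsim hpick
      have h1 : (pvAInner used u 0 maxd incr ((PySem.List.pyGet? seq (-1)).getD 0) mi).1 = [] :=
        congrArg Prod.fst hsim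
      simp only [pvALoop, pvBLoop, hpick, Option.map_none, h1, PySem.List.min?, List.foldl_nil]
    | some key =>
      rw [hB] at hsim hpick
      obtain ⟨m, h1, h2, h3, _⟩ := hsim
      subst h1
      have hnote : (pvKeyOf u maxd ((PySem.List.pyGet? seq (-1)).getD 0) m).2.2.2.2 = m := rfl
      simp only [pvALoop, pvBLoop, hpick, Option.map_some, hnote, h3, pvCandOf, sub_zero]
      apply ih
      rw [pv_pyGet_append_last]
      simpa using pv_contains_add_self used m

-- ===== VERDICT (by name: the statement is the Claim_ definition above) =====
theorem greedy_maximize_sequence_spec : Claim_equal_greedy_maximize_sequence := by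
  intro n mi _
  unfold Spec_greedy_maximize_sequence greedy_maximize_sequence greedy_maximize_sequence_alt
  apply pv_loop_eq
  decide
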